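-- pv_equiv track=rewrite | github.com/posl/comment_recommendation | script/mod_gen/5_time/ja/207_B/1.py | count_operation
-- ===== SOURCE A (Python) =====
-- def count_operation(a,b,c,d):
--     if a <= b:
--         return -1
--     if b > c*d:
--         return 0
--     count = 0
--     while True:
--         if a <= b:
--             break
--         a += c
--         b += d
--         count += 1
--     return count
-- ===== SOURCE B (Python) =====
-- def count_operation(a, b, c, d):
--     if a <= b:
--         return -1
--     if b > c * d:
--         return 0
--     # gap a-b shrinks by (d-c) each step: count = ceil((a-b)/(d-c))
--     return -((b - a) // (d - c))
-- ===== Notes on version B (the rewrite author's own statement) =====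
-- stated objective: simpler
-- what changed: replaces the step-by-step catch-up loop with the closed form ceil((a-b)/(d-c)) computed as -((b-a)//(d-c)) after the same two guard branches
import Mathlib
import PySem

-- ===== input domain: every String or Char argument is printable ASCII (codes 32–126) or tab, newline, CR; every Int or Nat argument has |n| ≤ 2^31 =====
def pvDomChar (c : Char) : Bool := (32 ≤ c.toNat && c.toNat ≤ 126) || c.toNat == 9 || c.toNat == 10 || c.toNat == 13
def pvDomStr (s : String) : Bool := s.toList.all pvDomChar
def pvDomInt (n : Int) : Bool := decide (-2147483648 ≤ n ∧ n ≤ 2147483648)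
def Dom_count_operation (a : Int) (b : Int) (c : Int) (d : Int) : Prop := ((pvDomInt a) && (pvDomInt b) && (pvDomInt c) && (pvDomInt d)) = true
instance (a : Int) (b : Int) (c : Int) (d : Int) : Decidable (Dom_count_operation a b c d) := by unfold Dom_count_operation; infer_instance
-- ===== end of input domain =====

-- B replaces A's step-by-step catch-up loop with the closed form ceil((a-b)/(d-c)) after the same guards (objective: simpler).

-- ===== PORT A =====
-- A's while-loop; the `d ≤ c` branch is only a termination guard: Python A never
-- returns on those inputs (it loops forever), and they are excluded by Pre_.
def countLoopA (a b c d count : Int) : Int :=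
  if a ≤ b then count
  else if d ≤ c then count
  else countLoopA (a + c) (b + d) c d (count + 1)
termination_by (a - b).toNat
decreasing_by omega

def count_operation (a : Int) (b : Int) (c : Int) (d : Int) : Int :=
  if a ≤ b then -1
  else if b > c * d then 0
  else countLoopA a b c d 0

-- ===== PORT B =====
def count_operation_alt (a : Int) (b : Int) (c : Int) (d : Int) : Int :=
  if a ≤ b then -1
  else if b > c * d then 0
  else -(PySem.Int.floordiv (b - a) (d - c))

-- ===== PRECONDITION & SPEC =====
-- Pre_ excludes exactly the inputs (a > b, b ≤ c*d, c ≥ d) on which Python A never returns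
-- (the gap a-b never shrinks, so the while-loop runs forever).
def Pre_count_operation (a : Int) (b : Int) (c : Int) (d : Int) : Prop :=
  a ≤ b ∨ c * d < b ∨ c < d
instance (a : Int) (b : Int) (c : Int) (d : Int) : Decidable (Pre_count_operation a b c d) := by unfold Pre_count_operation; infer_instance

def pvWitness_count_operation : Int × Int × Int × Int := (5, 1, 1, 2)

def Spec_count_operation (a : Int) (b : Int) (c : Int) (d : Int) (out : Int) : Prop := out = count_operation_alt a b c d
instance (a : Int) (b : Int) (c : Int) (d : Int) (out : Int) : Decidable (Spec_count_operation a b c d out) := by unfold Spec_count_operation; infer_instance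

-- ===== CLAIM (what is proved, stated in full; the proofs are below) =====
def Claim_equal_count_operation : Prop := ∀ (a : Int) (b : Int) (c : Int) (d : Int), Dom_count_operation a b c d → Pre_count_operation a b c d → Spec_count_operation a b c d (count_operation a b c d)

-- ===== LEMMAS AND PROOFS =====

lemma countLoopA_eq (a b c d k : Int) (hc : c < d) (hab : b < a) :
    countLoopA a b c d k = k + -(PySem.Int.floordiv (b - a) (d - c)) := by
  rw [countLoopA]
  rw [if_neg (by omega), if_neg (by omega)]
  by_cases hstep : a + c ≤ b + d
  · rw [countLoopA, if_pos hstep]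
    have h1 : -(PySem.Int.floordiv (-(a - b)) (d - c)) = 1 := by
      rw [PySem.Int.neg_floordiv_neg_eq_iff_of_pos (by omega)]
      constructor <;> nlinarith
    have : (b - a) = -(a - b) := by ring
    rw [this, h1]
  · rw [countLoopA_eq (a + c) (b + d) c d (k + 1) hc (by omega)]
    have hq := PySem.Int.neg_floordiv_neg_eq_iff_of_pos
      (a := (a + c) - (b + d)) (b := d - c)
      (q := -(PySem.Int.floordiv ((b + d) - (a + c)) (d - c))) (by omega)
    have hrw : -((a + c) - (b + d)) = (b + d) - (a + c) := by ring
    rw [hrw] at hq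
    obtain ⟨h1, h2⟩ := hq.mp rfl
    have h3 : -(PySem.Int.floordiv (-(a - b)) (d - c))
        = -(PySem.Int.floordiv ((b + d) - (a + c)) (d - c)) + 1 := by
      rw [PySem.Int.neg_floordiv_neg_eq_iff_of_pos (by omega)]
      constructor <;> nlinarith
    have hba : (b - a) = -(a - b) := by ring
    rw [hba, h3]; ring
termination_by (a - b).toNat
decreasing_by omega

-- ===== VERDICT (by name: the statement is the Claim_ definition above) =====
theorem count_operation_spec : Claim_equal_count_operation := by
  intro a b c d _ hpre
  unfold Spec_count_operation count_operation count_operation_alt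
  by_cases h1 : a ≤ b
  · simp [h1]
  · by_cases h2 : b > c * d
    · simp [h1, h2]
    · have hc : c < d := by rcases hpre with h | h | h <;> omega
      rw [if_neg h1, if_neg h2, if_neg h1, if_neg h2,
        countLoopA_eq a b c d 0 hc (by omega)]
      ring
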